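-- pv_equiv track=rewrite | github.com/prohunter00017/BgpCreator | core/url_utils.py | _is_file_resource
-- ===== SOURCE A (Python) =====
-- def _is_file_resource(path: str) -> bool:
--     """
--     Check if a path is a file resource (not a page).
--
--     Args:
--         path: Path to check
--
--     Returns:
--         True if path is a file resource
--     """
--     # Check for common file extensions
--     file_extensions = [
--         '.xml', '.txt', '.json', '.js', '.css',
--         '.png', '.jpg', '.jpeg', '.gif', '.webp', '.svg', '.ico',
--         '.woff', '.woff2', '.ttf', '.eot',
--         '.pdf', '.zip'
--     ]
--
--     lower_path = path.lower()
--     for ext in file_extensions: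
--         if lower_path.endswith(ext):
--             return True
--
--     return False
-- ===== SOURCE B (Python) =====
-- _FILE_EXTENSIONS = frozenset({
--     '.xml', '.txt', '.json', '.js', '.css',
--     '.png', '.jpg', '.jpeg', '.gif', '.webp', '.svg', '.ico',
--     '.woff', '.woff2', '.ttf', '.eot',
--     '.pdf', '.zip'
-- })
--
--
-- def _is_file_resource(path: str) -> bool:
--     """Check if a path is a file resource (not a page)."""
--     suffix = []
--     for ch in reversed(path.lower()):
--         suffix.append(ch)
--         if ch == '.':
--             return ''.join(reversed(suffix)) in _FILE_EXTENSIONS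
--     return False
-- ===== Notes on version B (the rewrite author's own statement) =====
-- stated objective: alternative
-- what changed: Instead of scanning all 18 extensions with endswith, B walks the lowered path backwards once, collecting characters until it hits the last dot, and does a single frozenset membership test on that trailing suffix (returning False if no dot exists).
import Mathlib
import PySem

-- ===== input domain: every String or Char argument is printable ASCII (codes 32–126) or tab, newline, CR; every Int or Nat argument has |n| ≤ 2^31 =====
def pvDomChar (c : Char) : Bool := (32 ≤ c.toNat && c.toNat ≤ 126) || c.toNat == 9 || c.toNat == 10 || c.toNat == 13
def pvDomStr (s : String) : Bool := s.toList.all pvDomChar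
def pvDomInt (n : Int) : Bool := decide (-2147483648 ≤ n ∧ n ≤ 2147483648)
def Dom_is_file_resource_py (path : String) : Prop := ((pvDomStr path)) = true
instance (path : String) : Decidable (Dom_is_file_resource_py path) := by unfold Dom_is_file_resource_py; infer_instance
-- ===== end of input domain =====

-- B replaces A's loop over all 18 extensions (endswith each) by one backward walk over the lowered path
-- that collects the trailing suffix up to the last dot and tests it once against a frozenset (alternative decomposition).


-- ===== PORT A =====
-- A's literal extension list, in source order
def fileExtensionsA : List String :=
  [".xml", ".txt", ".json", ".js", ".css",
   ".png", ".jpg", ".jpeg", ".gif", ".webp", ".svg", ".ico",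
   ".woff", ".woff2", ".ttf", ".eot",
   ".pdf", ".zip"]

-- for..in with early 'return True' and final 'return False' = any
def is_file_resource_py (path : String) : Bool :=
  let lower_path := PySem.Str.lower path
  fileExtensionsA.any (fun ext => PySem.Str.endswith lower_path ext)

-- ===== PORT B =====
-- B's frozenset of extensions
def fileExtSetB : PySem.Set String :=
  PySem.Set.ofList
    [".xml", ".txt", ".json", ".js", ".css",
     ".png", ".jpg", ".jpeg", ".gif", ".webp", ".svg", ".ico",
     ".woff", ".woff2", ".ttf", ".eot",
     ".pdf", ".zip"]

-- Source B's 'for ch in reversed(lower_path)' loop with its accumulator 'suffix' and early return: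
-- acc holds ''.join(reversed(suffix)) minus the dot (the characters already passed, in original order)
def altScan : List Char → List Char → Bool
  | [], _ => false
  | c :: rest, acc =>
    if c = '.' then PySem.Set.contains fileExtSetB (String.ofList ('.' :: acc))
    else altScan rest (c :: acc)

def is_file_resource_py_alt (path : String) : Bool :=
  let lower_path := PySem.Str.lower path
  altScan lower_path.toList.reverse []

-- ===== PRECONDITION & SPEC =====
def Spec_is_file_resource_py (path : String) (out : Bool) : Prop := out = is_file_resource_py_alt path
instance (path : String) (out : Bool) : Decidable (Spec_is_file_resource_py path out) := by unfold Spec_is_file_resource_py; infer_instance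

-- ===== CLAIM (what is proved, stated in full; the proofs are below) =====
def Claim_equal_is_file_resource_py : Prop := ∀ (path : String), Dom_is_file_resource_py path → Spec_is_file_resource_py path (is_file_resource_py path)

-- ===== LEMMAS AND PROOFS =====

-- the extensions, as char lists
def extsL : List (List Char) := fileExtensionsA.map String.toList

lemma extsL_shape : ∀ e ∈ extsL, e.head? = some '.' ∧ '.' ∉ e.tail := by decide

-- frozenset membership on strings = char-list membership in extsL
lemma mem_fileExtSetB (s : String) :
    PySem.Set.contains fileExtSetB s = (s.toList ∈ extsL : Bool) := by
  rw [Bool.eq_iff_iff]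
  have hinj : Function.Injective String.toList := fun a b h => String.ext h
  simp only [PySem.Set.contains, List.contains_iff_mem, fileExtSetB,
    PySem.Set.mem_ofList, extsL, decide_eq_true_eq,
    List.mem_map_of_injective hinj]
  exact Iff.rfl

-- the backward scan never hits a dot when there is none
lemma altScan_no_dot (r : List Char) (acc : List Char) (h : '.' ∉ r) :
    altScan r acc = false := by
  induction r generalizing acc with
  | nil => rfl
  | cons c rest ih =>
    simp only [altScan]
    rw [if_neg (by simp at h; exact Ne.symm h.1), ih _ (by simp at h; exact h.2)]

-- the backward scan stops at the first dot of r (= last dot of the path)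
lemma altScan_first_dot (r₁ : List Char) (r₂ acc : List Char) (h : '.' ∉ r₁) :
    altScan (r₁ ++ '.' :: r₂) acc =
      PySem.Set.contains fileExtSetB (String.ofList ('.' :: (r₁.reverse ++ acc))) := by
  induction r₁ generalizing acc with
  | nil => simp [altScan]
  | cons c rest ih =>
    simp only [List.cons_append, altScan]
    rw [if_neg (by simp at h; exact Ne.symm h.1), ih _ (by simp at h; exact h.2)]
    simp

-- last-dot decomposition of a list containing a dot
lemma last_dot_split (L : List Char) (h : '.' ∈ L) :
    ∃ L₁ L₂, L = L₁ ++ '.' :: L₂ ∧ '.' ∉ L₂ := by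
  induction L using List.reverseRecOn with
  | nil => simp at h
  | append_singleton M x ih =>
    by_cases hx : x = '.'
    · exact ⟨M, [], by simp [hx], by simp⟩
    · have hM : '.' ∈ M := by
        rcases List.mem_append.mp h with h1 | h1
        · exact h1
        · simp at h1; exact absurd h1.symm hx
      obtain ⟨L₁, L₂, hEq, hNo⟩ := ih hM
      exact ⟨L₁, L₂ ++ [x], by simp [hEq], by
        intro hc; rcases List.mem_append.mp hc with h2 | h2
        · exact hNo h2
        · simp at h2; exact hx h2.symm⟩

-- core: A's any-endswith over L = B's backward scan over L.reverse
lemma core (L : List Char) :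
    (extsL.any fun e => PySem.Chars.endswith L e) = altScan L.reverse [] := by
  by_cases hdot : '.' ∈ L
  · obtain ⟨L₁, L₂, hEq, hNo⟩ := last_dot_split L hdot
    have hrev : L.reverse = L₂.reverse ++ '.' :: L₁.reverse := by
      subst hEq; simp
    rw [hrev, altScan_first_dot _ _ _ (by simpa using hNo)]
    simp only [List.reverse_reverse, List.append_nil, mem_fileExtSetB,
      String.toList_ofList]
    rw [Bool.eq_iff_iff]
    simp only [List.any_eq_true, decide_eq_true_eq]
    constructor
    · rintro ⟨e, hmem, hend⟩
      obtain ⟨hh, ht⟩ := extsL_shape e hmem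
      obtain ⟨t, he⟩ : ∃ t, e = '.' :: t := by
        cases e with
        | nil => simp at hh
        | cons a t => simp only [List.head?_cons, Option.some.injEq] at hh; exact ⟨t, by simp [hh]⟩
      subst he
      have hsuf : ('.' :: t) <:+ L :=
        List.isSuffixOf_iff_suffix.mp (by simpa [PySem.Chars.endswith] using hend)
      have hsuf₂ : ('.' :: L₂) <:+ L := ⟨L₁, hEq.symm⟩
      have ht' : '.' ∉ t := by simpa using ht
      have : t = L₂ := by
        rcases List.suffix_or_suffix_of_suffix hsuf hsuf₂ with hs | hs
        · rcases hs with ⟨p, hp⟩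
          cases p with
          | nil => simpa using hp
          | cons q qs =>
            exfalso
            apply hNo
            have hm : qs ++ '.' :: t = L₂ := (by simpa using hp : _ ∧ _).2
            rw [← hm]; simp
        · rcases hs with ⟨p, hp⟩
          cases p with
          | nil => simp at hp; exact hp.symm
          | cons q qs =>
            exfalso
            apply ht'
            have hm : qs ++ '.' :: L₂ = t := (by simpa using hp : _ ∧ _).2
            rw [← hm]; simp
      rw [← this]; exact hmem
    · intro hmem
      refine ⟨'.' :: L₂, hmem, ?_⟩
      simp only [PySem.Chars.endswith]
      exact List.isSuffixOf_iff_suffix.mpr ⟨L₁, hEq.symm⟩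
  · rw [altScan_no_dot _ _ (by simpa using hdot)]
    rw [Bool.eq_iff_iff]
    simp only [List.any_eq_true, Bool.false_eq_true, iff_false]
    rintro ⟨e, hmem, hend⟩
    obtain ⟨hh, _⟩ := extsL_shape e hmem
    have hsuf : e <:+ L :=
      List.isSuffixOf_iff_suffix.mp (by simpa [PySem.Chars.endswith] using hend)
    apply hdot
    apply hsuf.subset
    cases e with
    | nil => simp at hh
    | cons a t => simp only [List.head?_cons, Option.some.injEq] at hh; simp [hh]

-- ===== VERDICT (by name: the statement is the Claim_ definition above) =====
theorem is_file_resource_py_spec : Claim_equal_is_file_resource_py := by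
  intro path _
  unfold Spec_is_file_resource_py is_file_resource_py is_file_resource_py_alt
  simp only [PySem.Str.endswith_eq]
  have hA : (fileExtensionsA.any fun ext =>
      PySem.Chars.endswith (PySem.Str.lower path).toList ext.toList) =
      (extsL.any fun e => PySem.Chars.endswith (PySem.Str.lower path).toList e) := by
    rw [extsL, List.any_map]; rfl
  rw [hA, core]
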